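-- pv_equiv track=rewrite | github.com/ztx888/HaloWebUI | backend/open_webui/routers/images.py | _pick_personal_connection
-- ===== SOURCE A (Python) =====
-- from typing import Any, Optional
--
-- def _pick_personal_connection(
--     base_urls: list[str], keys: list[str], preferred_index: Optional[int] = None
-- ) -> Optional[tuple[int, str, str]]:
--     usable = _list_personal_connections(base_urls, keys)
--
--     if not usable:
--         return None
--
--     if preferred_index is not None:
--         for item in usable:
--             if item[0] == preferred_index:
--                 return item
--
--     return usable[0]
--
-- def _list_personal_connections(
--     base_urls: list[str], keys: list[str]
-- ) -> list[tuple[int, str, str]]: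
--     usable: list[tuple[int, str, str]] = []
--     for idx, (url, key) in enumerate(zip(base_urls or [], keys or [])):
--         u = str(url or "").strip()
--         k = str(key or "").strip()
--         if u and k:
--             usable.append((idx, u, k))
--     return usable
-- ===== SOURCE B (Python) =====
-- def _pick_personal_connection(base_urls, keys, preferred_index=None):
--     us = base_urls or []
--     ks = keys or []
--     if preferred_index is not None and 0 <= preferred_index < min(len(us), len(ks)):
--         u = str(us[preferred_index] or "").strip()
--         k = str(ks[preferred_index] or "").strip()
--         if u and k:
--             return (preferred_index, u, k)
--     for idx, (url, key) in enumerate(zip(us, ks)):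
--         u = str(url or "").strip()
--         k = str(key or "").strip()
--         if u and k:
--             return (idx, u, k)
--     return None
-- ===== Notes on version B (the rewrite author's own statement) =====
-- stated objective: alternative
-- what changed: B replaces A's materialize-the-whole-usable-list-then-scan-for-the-preferred-index approach by an O(1) direct bounds-checked lookup of the preferred slot followed by an early-exit scan for the first usable pair, never building the intermediate list.
import Mathlib
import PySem

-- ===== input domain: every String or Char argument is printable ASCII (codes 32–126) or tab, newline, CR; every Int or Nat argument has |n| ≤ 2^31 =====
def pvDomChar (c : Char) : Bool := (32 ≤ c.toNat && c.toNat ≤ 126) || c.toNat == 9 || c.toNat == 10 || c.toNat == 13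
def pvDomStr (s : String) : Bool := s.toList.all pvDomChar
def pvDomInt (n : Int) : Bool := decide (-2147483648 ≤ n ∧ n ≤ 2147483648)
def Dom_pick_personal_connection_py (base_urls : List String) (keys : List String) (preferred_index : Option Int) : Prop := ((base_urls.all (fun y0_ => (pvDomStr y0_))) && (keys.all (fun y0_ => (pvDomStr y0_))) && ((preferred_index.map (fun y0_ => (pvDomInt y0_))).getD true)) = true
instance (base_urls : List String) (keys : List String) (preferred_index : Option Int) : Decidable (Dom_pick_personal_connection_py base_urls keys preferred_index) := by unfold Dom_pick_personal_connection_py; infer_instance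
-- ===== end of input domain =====

-- B replaces A's build-full-usable-list-then-scan by a direct bounds-checked lookup of the
-- preferred slot plus an early-exit first-usable scan (objective: alternative decomposition;
-- equal return values proved below).

-- ===== PORT A =====
-- _list_personal_connections: enumerate(zip(...)), append usable (idx, stripped url, stripped key)
def pvListPersonalConnections (base_urls : List String) (keys : List String) : List (Int × String × String) :=
  (PySem.List.enumerate (base_urls.zip keys) 0).foldl
    (fun acc it =>
      let u := PySem.Str.strip it.2.1   -- str(url or "").strip(): url is a str, so this is url.strip()
      let k := PySem.Str.strip it.2.2
      if u ≠ "" ∧ k ≠ "" then acc ++ [(it.1, u, k)] else acc) []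

def pick_personal_connection_py (base_urls : List String) (keys : List String) (preferred_index : Option Int) : Option (Int × String × String) :=
  let usable := pvListPersonalConnections base_urls keys
  if usable.isEmpty then none
  else
    match preferred_index with
    | some p =>
      match usable.find? (fun it => it.1 == p) with   -- 'for item in usable: if item[0]==preferred: return item'
      | some it => some it
      | none => usable[0]?
    | none => usable[0]?

-- ===== PORT B =====
-- the early-exit scan 'for idx,(url,key) in enumerate(zip(us,ks)): ... return'
def pvFirstUsable : List (String × String) → Int → Option (Int × String × String)
  | [], _ => none
  | (url, key) :: rest, i =>
    let u := PySem.Str.strip url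
    let k := PySem.Str.strip key
    if u ≠ "" ∧ k ≠ "" then some (i, u, k) else pvFirstUsable rest (i + 1)

def pick_personal_connection_py_alt (base_urls : List String) (keys : List String) (preferred_index : Option Int) : Option (Int × String × String) :=
  let pairs := base_urls.zip keys
  let direct : Option (Int × String × String) :=
    match preferred_index with
    | some p =>
      if 0 ≤ p ∧ p < (pairs.length : Int) then
        match PySem.List.pyGet? pairs p with
        | some (url, key) =>
          let u := PySem.Str.strip url
          let k := PySem.Str.strip key
          if u ≠ "" ∧ k ≠ "" then some (p, u, k) else none
        | none => none
      else none
    | none => none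
  match direct with
  | some r => some r
  | none => pvFirstUsable pairs 0

-- ===== PRECONDITION & SPEC =====
def Spec_pick_personal_connection_py (base_urls : List String) (keys : List String) (preferred_index : Option Int) (out : Option (Int × String × String)) : Prop := out = pick_personal_connection_py_alt base_urls keys preferred_index
instance (base_urls : List String) (keys : List String) (preferred_index : Option Int) (out : Option (Int × String × String)) : Decidable (Spec_pick_personal_connection_py base_urls keys preferred_index out) := by unfold Spec_pick_personal_connection_py; infer_instance

-- ===== CLAIM (what is proved, stated in full; the proofs are below) =====
def Claim_equal_pick_personal_connection_py : Prop := ∀ (base_urls : List String) (keys : List String) (preferred_index : Option Int), Dom_pick_personal_connection_py base_urls keys preferred_index → Spec_pick_personal_connection_py base_urls keys preferred_index (pick_personal_connection_py base_urls keys preferred_index)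

-- ===== LEMMAS AND PROOFS =====

-- proof-only cons-style presentation of A's usable list
def pvUsableFrom : List (String × String) → Int → List (Int × String × String)
  | [], _ => []
  | (url, key) :: rest, i =>
    let u := PySem.Str.strip url
    let k := PySem.Str.strip key
    if u ≠ "" ∧ k ≠ "" then (i, u, k) :: pvUsableFrom rest (i + 1) else pvUsableFrom rest (i + 1)

theorem pvFoldl_eq_usableFrom (pairs : List (String × String)) :
    ∀ (i : Int) (acc : List (Int × String × String)),
    (PySem.List.enumerate pairs i).foldl
      (fun acc it =>
        let u := PySem.Str.strip it.2.1
        let k := PySem.Str.strip it.2.2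
        if u ≠ "" ∧ k ≠ "" then acc ++ [(it.1, u, k)] else acc) acc
    = acc ++ pvUsableFrom pairs i := by
  induction pairs with
  | nil => intro i acc; simp [PySem.List.enumerate_nil, pvUsableFrom]
  | cons hd tl ih =>
    intro i acc
    obtain ⟨url, key⟩ := hd
    simp only [PySem.List.enumerate_cons, List.foldl_cons, pvUsableFrom]
    by_cases h : PySem.Str.strip url ≠ "" ∧ PySem.Str.strip key ≠ ""
    · simp only [if_pos h, ih]
      simp
    · simp only [if_neg h, ih]

theorem pvFirstUsable_eq_head (pairs : List (String × String)) :
    ∀ i : Int, pvFirstUsable pairs i = (pvUsableFrom pairs i).head? := by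
  induction pairs with
  | nil => intro i; rfl
  | cons hd tl ih =>
    intro i
    obtain ⟨url, key⟩ := hd
    simp only [pvFirstUsable, pvUsableFrom]
    by_cases h : PySem.Str.strip url ≠ "" ∧ PySem.Str.strip key ≠ ""
    · simp [if_pos h]
    · simp [if_neg h, ih]

theorem pvFind_usableFrom (pairs : List (String × String)) :
    ∀ (i p : Int),
    (pvUsableFrom pairs i).find? (fun it => it.1 == p)
    = (if 0 ≤ p - i then
        match pairs[(p - i).toNat]? with
        | some (url, key) =>
          let u := PySem.Str.strip url
          let k := PySem.Str.strip key
          if u ≠ "" ∧ k ≠ "" then some (p, u, k) else none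
        | none => none
      else none) := by
  induction pairs with
  | nil => intro i p; simp [pvUsableFrom]
  | cons hd tl ih =>
    intro i p
    obtain ⟨url, key⟩ := hd
    simp only [pvUsableFrom]
    by_cases hp : p = i
    · subst hp
      by_cases h : PySem.Str.strip url ≠ "" ∧ PySem.Str.strip key ≠ ""
      · simp [if_pos h]
      · simp only [if_neg h, ih]
        have hlt : ¬ (0 : Int) ≤ p - (p + 1) := by omega
        simp [h]
    · have hbeq : ((i == p) : Bool) = false := by simp [Ne.symm hp]
      by_cases hge : 0 ≤ p - i
      · have htn : (p - i).toNat = (p - (i + 1)).toNat + 1 := by omega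
        have h1 : i < p := by omega
        by_cases h : PySem.Str.strip url ≠ "" ∧ PySem.Str.strip key ≠ ""
        · simp only [if_pos h, List.find?, hbeq, ih]
          simp [htn, h1, h1.le]
        · simp only [if_neg h, ih]
          simp [htn, h1, h1.le]
      · have h1 : ¬ i < p := by omega
        have h2 : ¬ i ≤ p := by omega
        by_cases h : PySem.Str.strip url ≠ "" ∧ PySem.Str.strip key ≠ ""
        · simp only [if_pos h, List.find?, hbeq, ih]
          simp [h1, h2]
        · simp only [if_neg h, ih]
          simp [h1, h2]

-- B's direct-lookup expression equals A's find? over the usable list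
theorem pvDirect_eq_find (pairs : List (String × String)) (p : Int) :
    (if 0 ≤ p ∧ p < (pairs.length : Int) then
        match PySem.List.pyGet? pairs p with
        | some (url, key) =>
          let u := PySem.Str.strip url
          let k := PySem.Str.strip key
          if u ≠ "" ∧ k ≠ "" then some (p, u, k) else none
        | none => none
      else none)
    = (pvUsableFrom pairs 0).find? (fun it => it.1 == p) := by
  rw [pvFind_usableFrom]
  by_cases hb : 0 ≤ p ∧ p < (pairs.length : Int)
  · obtain ⟨n, rfl⟩ := Int.eq_ofNat_of_zero_le hb.1
    have hge : (0 : Int) ≤ (n : Int) - 0 := by omega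
    rw [if_pos hb, if_pos hge]
    simp
  · rw [if_neg hb]
    by_cases hge : (0 : Int) ≤ p - 0
    · rw [if_pos hge]
      have hlen : pairs.length ≤ (p - 0).toNat := by omega
      rw [List.getElem?_eq_none hlen]
    · rw [if_neg hge]

theorem pick_personal_connection_py_spec' (base_urls keys : List String) (preferred_index : Option Int) :
    pick_personal_connection_py base_urls keys preferred_index
    = pick_personal_connection_py_alt base_urls keys preferred_index := by
  cases preferred_index with
  | none =>
    simp only [pick_personal_connection_py, pick_personal_connection_py_alt, pvListPersonalConnections]
    rw [pvFoldl_eq_usableFrom, List.nil_append, pvFirstUsable_eq_head]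
    cases pvUsableFrom (base_urls.zip keys) 0 with
    | nil => rfl
    | cons a tl => simp
  | some p =>
    simp only [pick_personal_connection_py, pick_personal_connection_py_alt, pvListPersonalConnections]
    rw [pvFoldl_eq_usableFrom, List.nil_append, pvFirstUsable_eq_head, pvDirect_eq_find]
    cases hu : pvUsableFrom (base_urls.zip keys) 0 with
    | nil => simp [List.find?]
    | cons a tl =>
      cases hf : List.find? (fun it => it.1 == p) (a :: tl) with
      | none => simp
      | some it => simp

-- ===== VERDICT (by name: the statement is the Claim_ definition above) =====
theorem pick_personal_connection_py_spec : Claim_equal_pick_personal_connection_py := by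
  intro base_urls keys preferred_index _
  exact pick_personal_connection_py_spec' base_urls keys preferred_index
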